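-- pv_equiv track=rewrite | github.com/F145H-F145H/SEMPATCH | scripts/sidechain/eval_bcsd.py | build_relevant_pairs
-- ===== SOURCE A (Python) =====
-- def build_relevant_pairs(
--     query_names: list[str], db_names: list[str]
-- ) -> set[tuple[int, int]]:
--     """
--     构建 relevant_pairs：(query_idx, db_idx) 同名即相关。
--     """
--     pairs: set[tuple[int, int]] = set()
--     for qi, qn in enumerate(query_names):
--         for di, dn in enumerate(db_names):
--             if qn == dn:
--                 pairs.add((qi, di))
--     return pairs
-- ===== SOURCE B (Python) =====
-- def build_relevant_pairs(
--     query_names: list[str], db_names: list[str]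
-- ) -> set[tuple[int, int]]:
--     # Hash-join: group db indices by name once, then emit each query's matches.
--     by_name: dict[str, list[int]] = {}
--     for di, dn in enumerate(db_names):
--         by_name.setdefault(dn, []).append(di)
--     return {
--         (qi, di)
--         for qi, qn in enumerate(query_names)
--         for di in by_name.get(qn, ())
--     }
-- ===== Notes on version B (the rewrite author's own statement) =====
-- stated objective: alternative
-- what changed: Replaces the nested query-by-db scan with a hash join: a dict grouping db indices by name is built in one pass, and a set comprehension emits each query's matching index pairs directly; avoids the q*d comparisons but a timing run (duplicate-heavy inputs, output itself quadratic) could not confirm a speedup, so none is claimed.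
import Mathlib
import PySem

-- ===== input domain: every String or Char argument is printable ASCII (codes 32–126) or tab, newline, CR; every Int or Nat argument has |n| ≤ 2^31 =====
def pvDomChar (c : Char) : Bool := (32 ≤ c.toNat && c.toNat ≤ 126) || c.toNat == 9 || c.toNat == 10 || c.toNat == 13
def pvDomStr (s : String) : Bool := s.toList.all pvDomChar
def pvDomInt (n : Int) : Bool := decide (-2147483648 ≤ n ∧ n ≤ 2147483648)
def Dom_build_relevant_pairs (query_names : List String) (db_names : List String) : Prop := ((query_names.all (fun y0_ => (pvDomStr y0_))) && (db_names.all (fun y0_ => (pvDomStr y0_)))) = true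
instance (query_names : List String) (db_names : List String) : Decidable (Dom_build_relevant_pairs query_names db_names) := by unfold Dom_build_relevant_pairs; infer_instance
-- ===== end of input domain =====

-- B replaces A's nested query×db scan with a hash join (db indices grouped by name once); same returned set.

-- ===== PORT A =====
def build_relevant_pairs (query_names : List String) (db_names : List String) : List (Int × Int) :=
  (PySem.List.enumerate query_names).foldl
    (fun pairs qp =>
      (PySem.List.enumerate db_names).foldl
        (fun s dp => if qp.2 == dp.2 then PySem.Set.add s (qp.1, dp.1) else s)
        pairs)
    PySem.Set.empty

-- ===== PORT B =====
def build_relevant_pairs_alt (query_names : List String) (db_names : List String) : List (Int × Int) :=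
  let by_name : PySem.Dict String (List Int) :=
    (PySem.List.enumerate db_names).foldl
      (fun m dp => m.modify dp.2 [] (· ++ [dp.1])) PySem.Dict.empty
  (PySem.List.enumerate query_names).foldl
    (fun pairs qp =>
      (by_name.getD qp.2 []).foldl (fun s di => PySem.Set.add s (qp.1, di)) pairs)
    PySem.Set.empty

-- ===== PRECONDITION & SPEC =====
def Spec_build_relevant_pairs (query_names : List String) (db_names : List String) (out : List (Int × Int)) : Prop := out = build_relevant_pairs_alt query_names db_names
instance (query_names : List String) (db_names : List String) (out : List (Int × Int)) : Decidable (Spec_build_relevant_pairs query_names db_names out) := by unfold Spec_build_relevant_pairs; infer_instance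

-- ===== CLAIM (what is proved, stated in full; the proofs are below) =====
def Claim_equal_build_relevant_pairs : Prop := ∀ (query_names : List String) (db_names : List String), Dom_build_relevant_pairs query_names db_names → Spec_build_relevant_pairs query_names db_names (build_relevant_pairs query_names db_names)

-- ===== LEMMAS AND PROOFS =====

-- The grouping dict maps a name to exactly the db indices whose name matches it, in order.
theorem group_getD (db_names : List String) (n : String) :
    (((PySem.List.enumerate db_names).foldl
        (fun (m : PySem.Dict String (List Int)) dp => m.modify dp.2 [] (· ++ [dp.1]))
        PySem.Dict.empty).getD n [])
      = ((PySem.List.enumerate db_names).filter (fun dp => dp.2 == n)).map (·.1) := by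
  have h := PySem.Dict.getD_foldl_modify_append
      (l := (PySem.List.enumerate db_names).map Prod.swap) (d := PySem.Dict.empty) (c := n)
  rw [List.foldl_map] at h
  simp only [Prod.swap] at h
  rw [h]
  simp [List.filter_map, Function.comp_def]

-- A's inner scan over db equals folding the matching indices for the query's name.
theorem inner_scan (l : List (Int × String)) (qi : Int) (qn : String)
    (pairs : PySem.Set (Int × Int)) :
    l.foldl (fun s dp => if qn == dp.2 then PySem.Set.add s (qi, dp.1) else s) pairs
      = ((l.filter (fun dp => dp.2 == qn)).map (·.1)).foldl
          (fun s di => PySem.Set.add s (qi, di)) pairs := by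
  induction l generalizing pairs with
  | nil => rfl
  | cons hd tl ih =>
    simp only [List.foldl_cons, List.filter_cons]
    by_cases h : hd.2 = qn
    · have h1 : (qn == hd.2) = true := by simp [h]
      have h2 : (hd.2 == qn) = true := by simp [h]
      rw [h1, h2, if_pos rfl]
      simpa using ih (PySem.Set.add pairs (qi, hd.1))
    · have h1 : (qn == hd.2) = false := by simp [Ne.symm h]
      have h2 : (hd.2 == qn) = false := by simp [h]
      rw [h1, h2, if_neg (by simp)]
      exact ih pairs

-- ===== VERDICT (by name: the statement is the Claim_ definition above) =====
theorem build_relevant_pairs_spec : Claim_equal_build_relevant_pairs := by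
  intro query_names db_names _
  show build_relevant_pairs query_names db_names = build_relevant_pairs_alt query_names db_names
  unfold build_relevant_pairs build_relevant_pairs_alt
  have hf : (fun (pairs : PySem.Set (Int × Int)) (qp : Int × String) =>
      (PySem.List.enumerate db_names).foldl
        (fun s dp => if qp.2 == dp.2 then PySem.Set.add s (qp.1, dp.1) else s) pairs)
    = (fun (pairs : PySem.Set (Int × Int)) (qp : Int × String) =>
      ((((PySem.List.enumerate db_names).foldl
          (fun (m : PySem.Dict String (List Int)) dp => m.modify dp.2 [] (· ++ [dp.1]))
          PySem.Dict.empty).getD qp.2 [])).foldl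
        (fun s di => PySem.Set.add s (qp.1, di)) pairs) := by
    funext pairs qp
    rw [group_getD, inner_scan]
  rw [hf]
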